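-- pv_equiv track=rewrite | github.com/kidsama/code_note | 00.b.test/test015.py | right_align_add_lists
-- ===== SOURCE A (Python) =====
-- def right_align_add_lists(list1, list2):
--     # 计算两个列表长度差
--     diff = abs(len(list1) - len(list2))
--
--     # 根据长度差决定哪个列表需要在左侧填充零
--     if len(list1) < len(list2):
--         list1 = [0] * diff + list1
--     else:
--         list2 = [0] * diff + list2
--
--     # 直接相加，此时两个列表已右对齐
--     result = [x + y for x, y in zip(list1, list2)]
--
--     return result
-- ===== SOURCE B (Python) =====
-- def right_align_add_lists(list1, list2):
--     # Walk both lists from the right, substituting 0 once a list has ended;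
--     # no length-difference branch and no padding list is built.
--     out = []
--     i, j = len(list1) - 1, len(list2) - 1
--     while i >= 0 or j >= 0:
--         a = list1[i] if i >= 0 else 0
--         b = list2[j] if j >= 0 else 0
--         out.append(a + b)
--         i -= 1
--         j -= 1
--     return out[::-1]
-- ===== Notes on version B (the rewrite author's own statement) =====
-- stated objective: simpler
-- what changed: Instead of computing the length difference, branching on which list is shorter and building a zero-padding prefix before a forward zip, B walks both lists right-to-left with two indices, substitutes 0 for whichever list has ended, and reverses the collected sums; the branch and the padding list disappear.
import Mathlib
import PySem

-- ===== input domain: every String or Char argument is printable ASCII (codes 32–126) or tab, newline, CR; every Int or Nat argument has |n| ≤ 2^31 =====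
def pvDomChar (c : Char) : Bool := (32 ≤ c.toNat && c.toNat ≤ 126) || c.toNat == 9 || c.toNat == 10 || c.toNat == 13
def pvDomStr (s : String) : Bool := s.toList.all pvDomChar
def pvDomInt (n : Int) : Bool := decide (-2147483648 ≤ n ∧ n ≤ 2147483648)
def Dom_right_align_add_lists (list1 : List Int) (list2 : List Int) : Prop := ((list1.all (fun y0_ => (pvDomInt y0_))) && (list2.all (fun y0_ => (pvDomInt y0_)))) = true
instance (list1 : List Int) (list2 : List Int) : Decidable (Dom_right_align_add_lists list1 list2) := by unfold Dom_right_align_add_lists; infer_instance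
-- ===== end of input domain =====

-- B replaces A's branch-and-pad-then-zip with a right-to-left walk that substitutes 0 for the ended list (simpler decomposition).


-- ===== PORT A =====
def right_align_add_lists (list1 : List Int) (list2 : List Int) : List Int :=
  let diff : Nat := ((list1.length : Int) - (list2.length : Int)).natAbs
  if list1.length < list2.length then
    let list1' := List.replicate diff (0 : Int) ++ list1
    List.zipWith (· + ·) list1' list2
  else
    let list2' := List.replicate diff (0 : Int) ++ list2
    List.zipWith (· + ·) list1 list2'

-- ===== PORT B =====
-- right-to-left walk over the two reversed lists: 0 is substituted once a list has ended
def pvAddRev : List Int → List Int → List Int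
  | [], ys => ys
  | xs, [] => xs
  | x :: xs, y :: ys => (x + y) :: pvAddRev xs ys

def right_align_add_lists_alt (list1 : List Int) (list2 : List Int) : List Int :=
  (pvAddRev list1.reverse list2.reverse).reverse

-- ===== PRECONDITION & SPEC =====
def Spec_right_align_add_lists (list1 : List Int) (list2 : List Int) (out : List Int) : Prop := out = right_align_add_lists_alt list1 list2
instance (list1 : List Int) (list2 : List Int) (out : List Int) : Decidable (Spec_right_align_add_lists list1 list2 out) := by unfold Spec_right_align_add_lists; infer_instance

-- ===== CLAIM (what is proved, stated in full; the proofs are below) =====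
def Claim_equal_right_align_add_lists : Prop := ∀ (list1 : List Int) (list2 : List Int), Dom_right_align_add_lists list1 list2 → Spec_right_align_add_lists list1 list2 (right_align_add_lists list1 list2)

-- ===== LEMMAS AND PROOFS =====

theorem zipWith_zero_left : ∀ (ys : List Int), List.zipWith (· + ·) (List.replicate ys.length (0 : Int)) ys = ys := by
  intro ys
  induction ys with
  | nil => rfl
  | cons y ys ih => simp [List.replicate_succ, ih]

theorem zipWith_zero_right : ∀ (xs : List Int), List.zipWith (· + ·) xs (List.replicate xs.length (0 : Int)) = xs := by
  intro xs
  induction xs with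
  | nil => rfl
  | cons x xs ih => simp [List.replicate_succ, ih]

-- pvAddRev is a forward zip after padding each list on the RIGHT to the common length
theorem pvAddRev_eq_zipWith : ∀ (xs ys : List Int),
    pvAddRev xs ys =
      List.zipWith (· + ·) (xs ++ List.replicate (ys.length - xs.length) 0)
        (ys ++ List.replicate (xs.length - ys.length) 0) := by
  intro xs
  induction xs with
  | nil =>
    intro ys
    simpa [pvAddRev] using (zipWith_zero_left ys).symm
  | cons x xs ih =>
    intro ys
    cases ys with
    | nil =>
      simpa [pvAddRev] using (zipWith_zero_right (x :: xs)).symm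
    | cons y ys =>
      simp [pvAddRev, ih ys]

theorem right_align_add_lists_spec' : ∀ (list1 list2 : List Int),
    right_align_add_lists list1 list2 = right_align_add_lists_alt list1 list2 := by
  intro l1 l2
  unfold right_align_add_lists right_align_add_lists_alt
  rw [pvAddRev_eq_zipWith]
  by_cases h : l1.length < l2.length
  · have hd : ((l1.length : Int) - (l2.length : Int)).natAbs = l2.length - l1.length := by omega
    have hlen : (l1.reverse ++ List.replicate (l2.reverse.length - l1.reverse.length) (0 : Int)).length
        = (l2.reverse ++ List.replicate (l1.reverse.length - l2.reverse.length) (0 : Int)).length := by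
      simp; omega
    simp only [h, if_true, hd]
    rw [List.reverse_zipWith hlen]
    have h2 : l1.length - l2.length = 0 := by omega
    simp [h2]
  · have hd : ((l1.length : Int) - (l2.length : Int)).natAbs = l1.length - l2.length := by omega
    have hlen : (l1.reverse ++ List.replicate (l2.reverse.length - l1.reverse.length) (0 : Int)).length
        = (l2.reverse ++ List.replicate (l1.reverse.length - l2.reverse.length) (0 : Int)).length := by
      simp; omega
    simp only [h, if_false, hd]
    rw [List.reverse_zipWith hlen]
    have h2 : l2.length - l1.length = 0 := by omega
    simp [h2]

-- ===== VERDICT (by name: the statement is the Claim_ definition above) =====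
theorem right_align_add_lists_spec : Claim_equal_right_align_add_lists := by
  intro l1 l2 _
  exact right_align_add_lists_spec' l1 l2
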